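-- pv_equiv track=rewrite | github.com/nilum2002/IESL_Robogames_2024_First_Challange_First_round-Team_Botzilla- | controllers/robogame2024_controller/flood_fill.py | get_normalized_shortest_path
-- ===== SOURCE A (Python) =====
-- def get_normalized_shortest_path(points):
--     if len(points) <= 2:
--         return points
--
--     normalized_points = []
--
--     previous_direction = None
--
--     for i in range(1, len(points)):
--         x1, y1 = points[i - 1]
--         x2, y2 = points[i]
--         if x1 == x2:
--             if y2 > y1:
--                 current_direction = "D"
--             else:
--                 current_direction = "U"
--         else:
--             if x2 > x1:
--                 current_direction = "R"
--             else:
--                 current_direction = "L"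
--
--         if i == 1:
--             pass
--         elif current_direction != previous_direction:
--             normalized_points.append(points[i - 1])
--             if i == len(points) - 1:
--                 normalized_points.append(points[i])
--         elif i == len(points) - 1:
--             normalized_points.append(points[i])
--
--         previous_direction = current_direction
--
--     return normalized_points
-- ===== SOURCE B (Python) =====
-- def get_normalized_shortest_path(points):
--     if len(points) <= 2:
--         return points
--     directions = []
--     for (x1, y1), (x2, y2) in zip(points, points[1:]):
--         if x1 == x2:
--             directions.append("D" if y2 > y1 else "U")
--         else:
--             directions.append("R" if x2 > x1 else "L")
--     result = [points[s] for s in range(1, len(directions))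
--               if directions[s] != directions[s - 1]]
--     result.append(points[-1])
--     return result
-- ===== Notes on version B (the rewrite author's own statement) =====
-- stated objective: simpler
-- what changed: B separates the fused loop into two passes: first compute the per-segment direction labels over zip(points, points[1:]), then collect the interior points where the label changes and append the last point unconditionally, removing A's special i==1 and i==len-1 branches and the previous_direction state.
import Mathlib
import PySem

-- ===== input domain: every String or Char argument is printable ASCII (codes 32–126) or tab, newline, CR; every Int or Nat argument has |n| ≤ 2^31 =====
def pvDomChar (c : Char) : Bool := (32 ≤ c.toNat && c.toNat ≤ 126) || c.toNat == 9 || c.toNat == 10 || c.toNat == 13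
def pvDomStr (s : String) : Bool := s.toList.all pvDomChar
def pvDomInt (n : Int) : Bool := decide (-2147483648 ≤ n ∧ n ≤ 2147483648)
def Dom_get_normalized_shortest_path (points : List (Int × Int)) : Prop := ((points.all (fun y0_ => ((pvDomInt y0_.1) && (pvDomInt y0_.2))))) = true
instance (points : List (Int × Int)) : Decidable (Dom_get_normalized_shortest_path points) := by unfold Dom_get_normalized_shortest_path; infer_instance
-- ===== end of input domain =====

-- B is a simpler two-pass decomposition of A's single fused scan (same O(n) cost, no speed claim);
-- equivalence of the return values is proved on all inputs.

-- ===== PORT A =====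
-- one iteration of A's for-loop: state = (normalized_points, previous_direction)
def gnspStep (points : List (Int × Int)) (n : Int)
    (st : List (Int × Int) × Option String) (i : Int) : List (Int × Int) × Option String :=
  let p1 := PySem.List.pyGetD points (i - 1) (0, 0)
  let p2 := PySem.List.pyGetD points i (0, 0)
  let cur : String :=
    if p1.1 = p2.1 then (if p2.2 > p1.2 then "D" else "U")
    else (if p2.1 > p1.1 then "R" else "L")
  let np :=
    if i = 1 then st.1
    else if some cur ≠ st.2 then
      st.1 ++ [p1] ++ (if i = n - 1 then [p2] else [])
    else if i = n - 1 then st.1 ++ [p2] else st.1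
  (np, some cur)

def get_normalized_shortest_path (points : List (Int × Int)) : List (Int × Int) :=
  if points.length ≤ 2 then points
  else
    ((PySem.List.pyRange 1 (points.length : Int) 1).foldl
      (gnspStep points (points.length : Int)) ([], none)).1

-- ===== PORT B =====
-- direction label of the segment p → q (same rules as A's branch)
def gnspDir (p q : Int × Int) : String :=
  if p.1 = q.1 then (if q.2 > p.2 then "D" else "U")
  else (if q.1 > p.1 then "R" else "L")

def get_normalized_shortest_path_alt (points : List (Int × Int)) : List (Int × Int) :=
  if points.length ≤ 2 then points
  else
    let dirs := (points.zip points.tail).map (fun pq => gnspDir pq.1 pq.2)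
    let res := (PySem.List.pyRange 1 (dirs.length : Int) 1).filterMap (fun s =>
      if PySem.List.pyGetD dirs s "" ≠ PySem.List.pyGetD dirs (s - 1) "" then
        some (PySem.List.pyGetD points s (0, 0))
      else none)
    res ++ [PySem.List.pyGetD points (-1) (0, 0)]

-- ===== PRECONDITION & SPEC =====
def Spec_get_normalized_shortest_path (points : List (Int × Int)) (out : List (Int × Int)) : Prop := out = get_normalized_shortest_path_alt points
instance (points : List (Int × Int)) (out : List (Int × Int)) : Decidable (Spec_get_normalized_shortest_path points out) := by unfold Spec_get_normalized_shortest_path; infer_instance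

-- ===== CLAIM (what is proved, stated in full; the proofs are below) =====
def Claim_equal_get_normalized_shortest_path : Prop := ∀ (points : List (Int × Int)), Dom_get_normalized_shortest_path points → Spec_get_normalized_shortest_path points (get_normalized_shortest_path points)

-- ===== LEMMAS AND PROOFS =====

-- direction of segment k (0-based), via total getD indexing
def gnspD (p : List (Int × Int)) (k : Nat) : String :=
  gnspDir (p.getD k (0, 0)) (p.getD (k + 1) (0, 0))

-- the interior corner points among indices 1..m-1
def gnspC (p : List (Int × Int)) : Nat → List (Int × Int)
  | 0 => []
  | m + 1 => gnspC p m ++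
      (if 1 ≤ m ∧ gnspD p m ≠ gnspD p (m - 1) then [p.getD m (0, 0)] else [])

theorem gnsp_loopA (p : List (Int × Int)) (hn : 3 ≤ p.length) :
    ∀ m : Nat, 1 ≤ m → m ≤ p.length - 1 →
    (PySem.List.pyRange 1 ((m : Int) + 1) 1).foldl
        (gnspStep p (p.length : Int)) ([], none)
      = (gnspC p m ++ (if m = p.length - 1 then [p.getD (p.length - 1) (0, 0)] else []),
         some (gnspD p (m - 1))) := by
  intro m
  induction m with
  | zero => intro h; omega
  | succ m ih =>
    intro h1 h2
    rcases Nat.eq_zero_or_pos m with hm0 | hm1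
    · subst hm0
      rw [show ((1:Nat):Int) + 1 = 1 + 1 by norm_num,
          PySem.List.pyRange_one_cons (by omega), PySem.List.pyRange_one_eq_nil (by omega)]
      have h2' : (1:Nat) ≠ p.length - 1 := by omega
      simp [gnspStep, gnspC, gnspD, gnspDir, h2', pysem]
    · have hcast : ((m + 1 : Nat) : Int) + 1 = ((m : Int) + 1) + 1 := by push_cast; ring
      rw [hcast, PySem.List.pyRange_one_succ_right (by omega), List.foldl_append,
          ih (by omega) (by omega)]
      have hmne : m ≠ p.length - 1 := by omega
      have hi1 : (m : Int) + 1 ≠ 1 := by omega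
      simp only [List.foldl_cons, List.foldl_nil, gnspStep, if_neg hmne, if_neg hi1]
      have e1 : (m : Int) + 1 - 1 = ((m : Nat) : Int) := by ring
      have e2 : (m : Int) + 1 = ((m + 1 : Nat) : Int) := by push_cast; ring
      rw [e1, e2, PySem.List.pyGetD_natCast, PySem.List.pyGetD_natCast]
      have hd : (if (p.getD m (0,0)).1 = (p.getD (m+1) (0,0)).1 then
                   (if (p.getD (m+1) (0,0)).2 > (p.getD m (0,0)).2 then "D" else "U")
                 else (if (p.getD (m+1) (0,0)).1 > (p.getD m (0,0)).1 then "R" else "L"))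
                 = gnspD p m := by
        simp [gnspD, gnspDir]
      rw [hd]
      have hm0' : m ≠ 0 := by omega
      have hC : gnspC p (m+1) = gnspC p m ++
          (if gnspD p m = gnspD p (m-1) then [] else [p.getD m (0,0)]) := by
        simp [gnspC, Nat.one_le_iff_ne_zero, hm0']
      by_cases hlast : m + 1 = p.length - 1 <;> by_cases hne : gnspD p m = gnspD p (m - 1)
      · have hil : ((m:Int) + 1 = (p.length:Int) - 1) := by omega
        rw [hC, ← hlast]; simp [hne, hil]
      · have hil : ((m:Int) + 1 = (p.length:Int) - 1) := by omega
        rw [hC, ← hlast]; simp [hne, hil]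
      · have hil : ¬((m:Int) + 1 = (p.length:Int) - 1) := by omega
        rw [hC]; simp [hne, hil, hlast]
      · have hil : ¬((m:Int) + 1 = (p.length:Int) - 1) := by omega
        rw [hC]; simp [hne, hil, hlast]

theorem gnsp_dirs (p : List (Int × Int)) (s : Nat) (hs : s < p.length - 1) :
    ((p.zip p.tail).map (fun pq => gnspDir pq.1 pq.2)).getD s "" = gnspD p s := by
  have h1 : s < ((p.zip p.tail).map (fun pq => gnspDir pq.1 pq.2)).length := by
    simp [List.length_zip]; omega
  rw [List.getD_eq_getElem _ _ h1, gnspD,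
      List.getD_eq_getElem _ _ (by omega : s < p.length),
      List.getD_eq_getElem _ _ (by omega : s + 1 < p.length)]
  simp [List.getElem_zip, List.getElem_tail]

theorem gnsp_loopB (p : List (Int × Int)) :
    ∀ m : Nat, 1 ≤ m → m ≤ p.length - 1 →
    (PySem.List.pyRange 1 (m : Int) 1).filterMap (fun s =>
      if PySem.List.pyGetD ((p.zip p.tail).map (fun pq => gnspDir pq.1 pq.2)) s "" ≠
         PySem.List.pyGetD ((p.zip p.tail).map (fun pq => gnspDir pq.1 pq.2)) (s - 1) "" then
        some (PySem.List.pyGetD p s (0, 0))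
      else none) = gnspC p m := by
  intro m
  induction m with
  | zero => intro h; omega
  | succ m ih =>
    intro h1 h2
    rcases Nat.eq_zero_or_pos m with hm0 | hm1
    · subst hm0
      rw [show ((1:Nat):Int) = 1 by norm_num, PySem.List.pyRange_one_eq_nil (by omega)]
      simp [gnspC]
    · have hcast : ((m + 1 : Nat) : Int) = (m : Int) + 1 := by push_cast; ring
      rw [hcast, PySem.List.pyRange_one_succ_right (by omega), List.filterMap_append,
          ih (by omega) (by omega)]
      have e1 : (m : Int) - 1 = ((m - 1 : Nat) : Int) := by omega
      simp only [List.filterMap_cons, List.filterMap_nil, e1,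
        PySem.List.pyGetD_natCast]
      rw [gnsp_dirs p m (by omega), gnsp_dirs p (m - 1) (by omega)]
      have hm0' : m ≠ 0 := by omega
      have hC : gnspC p (m+1) = gnspC p m ++
          (if gnspD p m = gnspD p (m-1) then [] else [p.getD m (0,0)]) := by
        simp [gnspC, Nat.one_le_iff_ne_zero, hm0']
      rw [hC]
      by_cases hne : gnspD p m = gnspD p (m - 1) <;> simp [hne]

-- ===== VERDICT (by name: the statement is the Claim_ definition above) =====
theorem get_normalized_shortest_path_spec : Claim_equal_get_normalized_shortest_path := by
  intro points _
  unfold Spec_get_normalized_shortest_path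
  by_cases h : points.length ≤ 2
  · simp [get_normalized_shortest_path, get_normalized_shortest_path_alt, h]
  · have hn : 3 ≤ points.length := by omega
    have hA : get_normalized_shortest_path points
        = gnspC points (points.length - 1) ++ [points.getD (points.length - 1) (0,0)] := by
      have hfold := gnsp_loopA points hn (points.length - 1) (by omega) (le_refl _)
      have ecast : ((points.length - 1 : Nat) : Int) + 1 = (points.length : Int) := by omega
      rw [ecast] at hfold
      rw [get_normalized_shortest_path, if_neg h, hfold]
      simp
    have hB : get_normalized_shortest_path_alt points
        = gnspC points (points.length - 1) ++ [points.getD (points.length - 1) (0,0)] := by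
      simp only [get_normalized_shortest_path_alt, if_neg h]
      have hlen : ((points.zip points.tail).map (fun pq => gnspDir pq.1 pq.2)).length
          = points.length - 1 := by
        simp [List.length_zip]
      rw [hlen, gnsp_loopB points (points.length - 1) (by omega) (le_refl _)]
      congr 1
      have hnil : points ≠ [] := by intro hnil; rw [hnil] at hn; simp at hn
      rw [PySem.List.pyGetD_neg_one (h := hnil), List.getLast_eq_getElem,
          List.getD_eq_getElem _ _ (by omega)]
    rw [hA, hB]
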